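-- pv_equiv track=rewrite | github.com/pypi-data/pypi-mirror-45 | packages/integer-lang/integer_lang-0.5.0-py3-none-any.whl/integer_lang/INTEGER_lang.py | int_to_str
-- ===== SOURCE A (Python) =====
-- def int_to_str(num):
-- 	strlen = num % 256
-- 	num //= 256
-- 	res = ''
-- 	for i in range(strlen):
-- 		res = chr(num % 128) + res
-- 		num = num // 256
-- 	return res
-- ===== SOURCE B (Python) =====
-- def int_to_str(num):
--     strlen = num % 256
--     base = num // 256
--     return ''.join(chr((base // 256 ** i) % 128) for i in range(strlen - 1, -1, -1))
-- ===== Notes on version B (the rewrite author's own statement) =====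
-- stated objective: alternative
-- what changed: Replaces the accumulator loop that mutates a running num and prepends characters with a closed-form per-position computation chr((base // 256**i) % 128) joined over a countdown range, eliminating the threaded state.
import Mathlib
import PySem

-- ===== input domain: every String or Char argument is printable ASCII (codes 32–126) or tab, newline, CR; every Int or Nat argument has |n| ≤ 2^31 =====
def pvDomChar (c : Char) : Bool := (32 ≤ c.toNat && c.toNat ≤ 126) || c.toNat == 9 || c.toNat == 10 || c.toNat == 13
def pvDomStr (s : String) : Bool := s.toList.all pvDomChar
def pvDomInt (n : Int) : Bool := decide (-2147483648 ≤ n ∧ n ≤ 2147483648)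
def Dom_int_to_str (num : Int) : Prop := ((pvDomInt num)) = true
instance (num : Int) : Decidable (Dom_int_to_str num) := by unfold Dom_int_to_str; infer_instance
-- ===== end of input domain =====

-- B replaces A's accumulator loop (mutating a running num, prepending chars) by a
-- closed-form per-position character over a countdown range; same return value.

-- ===== PORT A =====
-- literal port of A: res threaded as a string, running num divided by 256 each step
def int_to_str (num : Int) : String :=
  let strlen := PySem.Int.mod num 256
  let num1 := PySem.Int.floordiv num 256
  let st := (PySem.List.pyRange 0 strlen 1).foldl
    (fun (st : String × Int) _ =>
      (String.ofList (Char.ofNat (PySem.Int.mod st.2 128).toNat :: st.1.toList),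
       PySem.Int.floordiv st.2 256))
    ("", num1)
  st.1

-- ===== PORT B =====
-- literal port of Source B; '256 ** i' with i from range(strlen-1,-1,-1) is ported as
-- 256 ^ i.toNat, exact since every i the range produces is ≥ 0
def int_to_str_alt (num : Int) : String :=
  let strlen := PySem.Int.mod num 256
  let base := PySem.Int.floordiv num 256
  String.ofList ((PySem.List.pyRange (strlen - 1) (-1) (-1)).map
    (fun i => Char.ofNat (PySem.Int.mod (PySem.Int.floordiv base ((256:Int) ^ i.toNat)) 128).toNat))

-- ===== PRECONDITION & SPEC =====
def Spec_int_to_str (num : Int) (out : String) : Prop := out = int_to_str_alt num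
instance (num : Int) (out : String) : Decidable (Spec_int_to_str num out) := by unfold Spec_int_to_str; infer_instance

-- ===== CLAIM (what is proved, stated in full; the proofs are below) =====
def Claim_equal_int_to_str : Prop := ∀ (num : Int), Dom_int_to_str num → Spec_int_to_str num (int_to_str num)

-- ===== LEMMAS AND PROOFS =====

def pvChr (m : Int) : Char := Char.ofNat (PySem.Int.mod m 128).toNat

def pvStep : String × Int → Int → String × Int :=
  fun st _ => (String.ofList (pvChr st.2 :: st.1.toList), PySem.Int.floordiv st.2 256)

def pvChars : Nat → Int → List Char
  | 0, _ => []
  | n + 1, m => pvChars n (PySem.Int.floordiv m 256) ++ [pvChr m]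

theorem pv_foldA (l : List Int) (m : Int) (acc : List Char) :
    (l.foldl pvStep (String.ofList acc, m)).1.toList = pvChars l.length m ++ acc := by
  induction l generalizing m acc with
  | nil => simp [pvChars]
  | cons x xs ih =>
      simp only [List.foldl_cons, List.length_cons, pvStep]
      rw [ih]
      simp [pvChars]

theorem pv_div_div (m : Int) (k : Nat) :
    PySem.Int.floordiv (PySem.Int.floordiv m 256) ((256:Int) ^ k)
      = PySem.Int.floordiv m ((256:Int) ^ (k + 1)) := by
  rw [PySem.Int.floordiv_eq_ediv_of_pos (by positivity),
      PySem.Int.floordiv_eq_ediv_of_pos (by norm_num),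
      PySem.Int.floordiv_eq_ediv_of_pos (by positivity),
      Int.ediv_ediv_of_nonneg (by norm_num), pow_succ']

theorem pv_chars_closed (n : Nat) (m : Int) :
    pvChars n m
      = ((List.range n).map (fun k => pvChr (PySem.Int.floordiv m ((256:Int) ^ k)))).reverse := by
  induction n generalizing m with
  | zero => simp [pvChars]
  | succ n ih =>
      rw [pvChars, ih]
      have h : (List.range n).map
          (fun k => pvChr (PySem.Int.floordiv (PySem.Int.floordiv m 256) ((256:Int) ^ k)))
          = (List.range n).map
          (fun k => pvChr (PySem.Int.floordiv m ((256:Int) ^ (k + 1)))) :=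
        List.map_congr_left (fun k _ => by rw [pv_div_div])
      rw [h, List.range_succ_eq_map]
      simp [List.map_map, Function.comp, pow_zero]

theorem pv_key (s base : Int) (hs : 0 ≤ s) :
    ((PySem.List.pyRange 0 s 1).foldl pvStep (("" : String), base)).1
      = String.ofList ((PySem.List.pyRange (s - 1) (-1) (-1)).map
          (fun i => pvChr (PySem.Int.floordiv base ((256:Int) ^ i.toNat)))) := by
  obtain ⟨n, hn⟩ : ∃ n : Nat, s = (n : Int) := ⟨s.toNat, (Int.toNat_of_nonneg hs).symm⟩
  subst hn
  apply String.ext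
  have hempty : ("" : String) = String.ofList [] := rfl
  rw [hempty, pv_foldA, String.toList_ofList]
  rw [PySem.List.pyRange_neg_one_eq_reverse]
  have h01 : ((-1 : Int) + 1) = 0 := by norm_num
  have h2 : ((n : Int) - 1 + 1) = (n : Int) := by ring
  rw [h01, h2, PySem.List.pyRange_zero_nat]
  simp only [List.length_map, List.length_range, List.append_nil, List.map_reverse,
    List.map_map]
  rw [pv_chars_closed]
  congr 1

-- ===== VERDICT (by name: the statement is the Claim_ definition above) =====
theorem int_to_str_spec : Claim_equal_int_to_str := by
  intro num _
  show int_to_str num = int_to_str_alt num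
  have hsn : 0 ≤ PySem.Int.mod num 256 := by
    rw [PySem.Int.mod_eq_emod_of_pos (by norm_num)]
    exact Int.emod_nonneg _ (by norm_num)
  exact pv_key (PySem.Int.mod num 256) (PySem.Int.floordiv num 256) hsn
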